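-- pv_equiv track=rewrite | github.com/fury93/leetcode_python3_solutions | 2653-check-if-there-is-a-path-with-equal-number-of-0s-and-1s/check-if-there-is-a-path-with-equal-number-of-0s-and-1s.py | isThereAPath
-- ===== SOURCE A (Python) =====
-- def isThereAPath(grid: list[list[int]]) -> bool:
--     rows, cols = len(grid), len(grid[0])
--
--     if (rows + cols) % 2 == 0:
--         return False
--
--     min_ = [[0] * cols for _ in range(rows)]
--     max_ = [[0] * cols for _ in range(rows)]
--
--     min_[0][0] = max_[0][0] = grid[0][0]
--
--     for row in range(1, rows):
--         min_[row][0] = min_[row - 1][0] + grid[row][0]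
--         max_[row][0] = max_[row - 1][0] + grid[row][0]
--
--     for col in range(1, cols):
--         min_[0][col] = min_[0][col - 1] + grid[0][col]
--         max_[0][col] = max_[0][col - 1] + grid[0][col]
--
--     for row in range(1, rows):
--         for col in range(1, cols):
--             min_prev = min(min_[row - 1][col], min_[row][col - 1])
--             min_[row][col] = min_prev + grid[row][col]
--
--             max_prev = max(max_[row - 1][col], max_[row][col - 1])
--             max_[row][col] = max_prev + grid[row][col]
--
--     target = (rows + cols - 1) // 2
--     return min_[rows - 1][cols - 1] <= target <= max_[rows - 1][cols - 1]
-- ===== SOURCE B (Python) =====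
-- def isThereAPath(grid: list[list[int]]) -> bool:
--     rows, cols = len(grid), len(grid[0])
--
--     if (rows + cols) % 2 == 0:
--         return False
--
--     memo = {}
--
--     def solve(r, c):
--         # (min path sum, max path sum) over monotone paths from (0,0) to (r,c)
--         if (r, c) in memo:
--             return memo[(r, c)]
--         if r == 0 and c == 0:
--             res = (grid[0][0], grid[0][0])
--         elif r == 0:
--             lo, hi = solve(0, c - 1)
--             res = (lo + grid[0][c], hi + grid[0][c])
--         elif c == 0:
--             lo, hi = solve(r - 1, 0)
--             res = (lo + grid[r][0], hi + grid[r][0])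
--         else:
--             ulo, uhi = solve(r - 1, c)
--             llo, lhi = solve(r, c - 1)
--             res = (min(ulo, llo) + grid[r][c], max(uhi, lhi) + grid[r][c])
--         memo[(r, c)] = res
--         return res
--
--     lo, hi = solve(rows - 1, cols - 1)
--     target = (rows + cols - 1) // 2
--     return lo <= target <= hi
-- ===== Notes on version B (the rewrite author's own statement) =====
-- stated objective: alternative
-- what changed: Replaces A's three-phase forward sweep that fills two full 2D min/max tables with a destination-driven memoized recursion solve(r,c) returning (min,max) pairs for monotone paths, cached in a single dict.
import Mathlib
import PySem

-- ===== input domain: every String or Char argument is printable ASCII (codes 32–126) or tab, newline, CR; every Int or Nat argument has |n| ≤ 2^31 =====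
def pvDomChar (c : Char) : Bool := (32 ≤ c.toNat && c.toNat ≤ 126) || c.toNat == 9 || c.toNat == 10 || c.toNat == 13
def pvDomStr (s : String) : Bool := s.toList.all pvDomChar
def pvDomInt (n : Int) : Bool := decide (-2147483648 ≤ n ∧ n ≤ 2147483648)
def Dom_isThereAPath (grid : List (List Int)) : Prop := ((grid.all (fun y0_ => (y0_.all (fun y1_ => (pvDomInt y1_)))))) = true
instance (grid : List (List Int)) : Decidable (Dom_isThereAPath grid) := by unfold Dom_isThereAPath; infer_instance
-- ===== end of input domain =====

-- B replaces A's three-phase forward sweep over two full 2D min/max tables by a destination-driven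
-- memoized recursion returning (min,max) pairs (objective: alternative, same asymptotic cost).

-- ===== PORT A =====
-- table write m[i][j] = v (all of A's indices are nonnegative and in range inside Pre_)
def pvSet2 (m : List (List Int)) (i j : Nat) (v : Int) : List (List Int) :=
  m.set i ((m.getD i []).set j v)
-- table / grid read m[i][j] (in range whenever Python does not raise, i.e. inside Pre_)
def pvGet2 (m : List (List Int)) (i j : Nat) : Int :=
  (m.getD i []).getD j 0

def isThereAPath (grid : List (List Int)) : Bool :=
  match grid with
  | [] => false   -- Python raises IndexError on grid[0] here (excluded by Pre_)
  | row0 :: _ =>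
    let rows := grid.length
    let cols := row0.length
    if (rows + cols) % 2 == 0 then false
    else
      let min0 := List.replicate rows (List.replicate cols (0 : Int))
      let max0 := List.replicate rows (List.replicate cols (0 : Int))
      let min1 := pvSet2 min0 0 0 (pvGet2 grid 0 0)
      let max1 := pvSet2 max0 0 0 (pvGet2 grid 0 0)
      let p1 := (List.range' 1 (rows - 1)).foldl
        (fun (s : List (List Int) × List (List Int)) row =>
          (pvSet2 s.1 row 0 (pvGet2 s.1 (row - 1) 0 + pvGet2 grid row 0),
           pvSet2 s.2 row 0 (pvGet2 s.2 (row - 1) 0 + pvGet2 grid row 0))) (min1, max1)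
      let p2 := (List.range' 1 (cols - 1)).foldl
        (fun (s : List (List Int) × List (List Int)) col =>
          (pvSet2 s.1 0 col (pvGet2 s.1 0 (col - 1) + pvGet2 grid 0 col),
           pvSet2 s.2 0 col (pvGet2 s.2 0 (col - 1) + pvGet2 grid 0 col))) p1
      let p3 := (List.range' 1 (rows - 1)).foldl
        (fun (s : List (List Int) × List (List Int)) row =>
          (List.range' 1 (cols - 1)).foldl
            (fun (s2 : List (List Int) × List (List Int)) col =>
              (pvSet2 s2.1 row col
                 (min (pvGet2 s2.1 (row - 1) col) (pvGet2 s2.1 row (col - 1)) + pvGet2 grid row col),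
               pvSet2 s2.2 row col
                 (max (pvGet2 s2.2 (row - 1) col) (pvGet2 s2.2 row (col - 1)) + pvGet2 grid row col))) s) p2
      let target : Int := ((rows + cols - 1) / 2 : Nat)
      decide (pvGet2 p3.1 (rows - 1) (cols - 1) ≤ target ∧ target ≤ pvGet2 p3.2 (rows - 1) (cols - 1))

-- ===== PORT B =====
-- grid[r][c] read by B's solve (in range whenever Source B does not raise, i.e. inside Pre_)
def pvCell (grid : List (List Int)) (r c : Nat) : Int :=
  (grid.getD r []).getD c 0

-- Source B's solve(r, c), branch for branch; the Python memo dict is a pure cache of these very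
-- values, so the port is the same recursion with the cache elided (value-identical)
def pvSolve (grid : List (List Int)) : Nat → Nat → Int × Int
  | 0, 0 => (pvCell grid 0 0, pvCell grid 0 0)
  | 0, c + 1 =>
      ((pvSolve grid 0 c).1 + pvCell grid 0 (c + 1), (pvSolve grid 0 c).2 + pvCell grid 0 (c + 1))
  | r + 1, 0 =>
      ((pvSolve grid r 0).1 + pvCell grid (r + 1) 0, (pvSolve grid r 0).2 + pvCell grid (r + 1) 0)
  | r + 1, c + 1 =>
      (min (pvSolve grid r (c + 1)).1 (pvSolve grid (r + 1) c).1 + pvCell grid (r + 1) (c + 1),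
       max (pvSolve grid r (c + 1)).2 (pvSolve grid (r + 1) c).2 + pvCell grid (r + 1) (c + 1))

def isThereAPath_alt (grid : List (List Int)) : Bool :=
  match grid with
  | [] => false   -- Source B raises IndexError on grid[0] here (excluded by Pre_)
  | row0 :: _ =>
    let rows := grid.length
    let cols := row0.length
    if (rows + cols) % 2 == 0 then false
    else
      let p := pvSolve grid (rows - 1) (cols - 1)
      let target : Int := ((rows + cols - 1) / 2 : Nat)
      decide (p.1 ≤ target ∧ target ≤ p.2)

-- ===== PRECONDITION & SPEC =====
-- Pre_ excludes exactly the inputs where A raises IndexError: the empty grid, and odd-parity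
-- grids whose first row is empty or that have some row shorter than the first row (A indexes
-- every row up to len(grid[0])); on even parity A returns False before any indexing.
def Pre_isThereAPath (grid : List (List Int)) : Prop :=
  grid ≠ [] ∧
    ((grid.length + (grid.headD []).length) % 2 = 0 ∨
      (1 ≤ (grid.headD []).length ∧ ∀ row ∈ grid, (grid.headD []).length ≤ row.length))
instance (grid : List (List Int)) : Decidable (Pre_isThereAPath grid) := by
  unfold Pre_isThereAPath; infer_instance

def pvWitness_isThereAPath : List (List Int) := [[0, 1]]

def Spec_isThereAPath (grid : List (List Int)) (out : Bool) : Prop := out = isThereAPath_alt grid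
instance (grid : List (List Int)) (out : Bool) : Decidable (Spec_isThereAPath grid out) := by
  unfold Spec_isThereAPath; infer_instance

-- ===== CLAIM (what is proved, stated in full; the proofs are below) =====
def Claim_equal_isThereAPath : Prop :=
  ∀ (grid : List (List Int)), Dom_isThereAPath grid → Pre_isThereAPath grid →
    Spec_isThereAPath grid (isThereAPath grid)

-- ===== LEMMAS AND PROOFS =====

-- the common mathematical value: min (op = min) / max (op = max) path sum to (r, c)
def solveG (g : Nat → Nat → Int) (op : Int → Int → Int) : Nat → Nat → Int
  | 0, 0 => g 0 0
  | 0, c + 1 => solveG g op 0 c + g 0 (c + 1)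
  | r + 1, 0 => solveG g op r 0 + g (r + 1) 0
  | r + 1, c + 1 => op (solveG g op r (c + 1)) (solveG g op (r + 1) c) + g (r + 1) (c + 1)

lemma pvCell_eq : pvCell = pvGet2 := rfl

lemma pvSolve_eq (grid : List (List Int)) (r c : Nat) :
    pvSolve grid r c = (solveG (pvCell grid) min r c, solveG (pvCell grid) max r c) := by
  fun_induction pvSolve grid r c <;> simp_all [solveG]

lemma foldl_prod {α β γ : Type} (l : List γ) (fg : α × β → γ → α × β)
    (f : α → γ → α) (h : β → γ → β)
    (hfg : ∀ a b x, fg (a, b) x = (f a x, h b x)) :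
    ∀ (a : α) (b : β), l.foldl fg (a, b) = (l.foldl f a, l.foldl h b) := by
  induction l with
  | nil => intro a b; rfl
  | cons x xs ih =>
      intro a b
      rw [List.foldl_cons, List.foldl_cons, List.foldl_cons, hfg]
      exact ih (f a x) (h b x)

def Shaped (m : List (List Int)) (R C : Nat) : Prop :=
  m.length = R ∧ ∀ row ∈ m, row.length = C

lemma shaped_replicate (R C : Nat) : Shaped (List.replicate R (List.replicate C (0 : Int))) R C := by
  constructor
  · simp
  · intro row hrow; simp [List.eq_of_mem_replicate hrow]

lemma set2_oob {m : List (List Int)} {i : Nat} (h : m.length ≤ i) (j : Nat) (v : Int) :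
    pvSet2 m i j v = m := by
  unfold pvSet2; exact List.set_eq_of_length_le h

lemma shaped_set2 {m : List (List Int)} {R C : Nat} (hs : Shaped m R C) (i j : Nat) (v : Int) :
    Shaped (pvSet2 m i j v) R C := by
  obtain ⟨h1, h2⟩ := hs
  by_cases hi : i < m.length
  · refine ⟨by simpa [pvSet2] using h1, ?_⟩
    intro row hrow
    rcases List.mem_or_eq_of_mem_set hrow with h | h
    · exact h2 _ h
    · subst h
      have hgi : m.getD i [] = m[i] := by simp [List.getD_eq_getElem?_getD, List.getElem?_eq_getElem hi]
      rw [hgi, List.length_set]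
      exact h2 _ (List.getElem_mem hi)
  · rw [set2_oob (by omega)]; exact ⟨h1, h2⟩

lemma get2_set2_same {m : List (List Int)} {R C : Nat} (hs : Shaped m R C)
    {i j : Nat} (hi : i < R) (hj : j < C) (v : Int) :
    pvGet2 (pvSet2 m i j v) i j = v := by
  obtain ⟨h1, h2⟩ := hs
  have hil : i < m.length := by omega
  have hgi : m.getD i [] = m[i] := by simp [List.getD_eq_getElem?_getD, List.getElem?_eq_getElem hil]
  have hlen : (m.getD i []).length = C := by rw [hgi]; exact h2 _ (List.getElem_mem hil)
  have hjl : j < (m[i]?.getD []).length := by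
    simp only [← List.getD_eq_getElem?_getD]; omega
  unfold pvGet2 pvSet2
  simp only [List.getD_eq_getElem?_getD]
  simp [List.getElem?_set_self hil, List.getElem?_set_self hjl]

lemma get2_set2_ne {m : List (List Int)} {i j r c : Nat} (h : r ≠ i ∨ c ≠ j) (v : Int) :
    pvGet2 (pvSet2 m i j v) r c = pvGet2 m r c := by
  by_cases hr : r = i
  · subst hr
    have hc : c ≠ j := by tauto
    by_cases hil : r < m.length
    · unfold pvGet2 pvSet2
      simp only [List.getD_eq_getElem?_getD]
      simp [List.getElem?_set_self hil, List.getElem?_set_ne (Ne.symm hc)]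
    · rw [set2_oob (by omega)]
  · unfold pvGet2 pvSet2
    simp only [List.getD_eq_getElem?_getD]
    rw [List.getElem?_set_ne (fun hh => hr hh.symm)]

lemma get2_replicate (R C r c : Nat) :
    pvGet2 (List.replicate R (List.replicate C (0 : Int))) r c = 0 := by
  unfold pvGet2
  rcases Nat.lt_or_ge r R with h | h
  · rcases Nat.lt_or_ge c C with h2 | h2 <;>
      simp [List.getD_eq_getElem?_getD, h, h2]
  · simp [List.getD_eq_getElem?_getD, Nat.not_lt.mpr h]

lemma range'_snoc (n : Nat) : List.range' 1 (n + 1) = List.range' 1 n ++ [n + 1] := by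
  rw [List.range'_concat, Nat.one_mul, Nat.add_comm 1 n]

-- the three loop phases of A, single-table versions (pair folds split into these below)
def sPh1 (grid : List (List Int)) (init : List (List Int)) (n : Nat) : List (List Int) :=
  (List.range' 1 n).foldl (fun m row => pvSet2 m row 0 (pvGet2 m (row - 1) 0 + pvGet2 grid row 0)) init

def sPh2 (grid : List (List Int)) (init : List (List Int)) (n : Nat) : List (List Int) :=
  (List.range' 1 n).foldl (fun m col => pvSet2 m 0 col (pvGet2 m 0 (col - 1) + pvGet2 grid 0 col)) init

def sRow (grid : List (List Int)) (op : Int → Int → Int) (row : Nat) (m : List (List Int)) (n : Nat) :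
    List (List Int) :=
  (List.range' 1 n).foldl
    (fun m2 col => pvSet2 m2 row col (op (pvGet2 m2 (row - 1) col) (pvGet2 m2 row (col - 1)) + pvGet2 grid row col)) m

def sPh3 (grid : List (List Int)) (op : Int → Int → Int) (init : List (List Int)) (nR nC : Nat) :
    List (List Int) :=
  (List.range' 1 nR).foldl (fun m row => sRow grid op row m nC) init

lemma pair1 (grid : List (List Int)) (n : Nat) (i1 i2 : List (List Int)) :
    (List.range' 1 n).foldl
      (fun (s : List (List Int) × List (List Int)) row =>
        (pvSet2 s.1 row 0 (pvGet2 s.1 (row - 1) 0 + pvGet2 grid row 0),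
         pvSet2 s.2 row 0 (pvGet2 s.2 (row - 1) 0 + pvGet2 grid row 0))) (i1, i2)
    = (sPh1 grid i1 n, sPh1 grid i2 n) :=
  foldl_prod _ _ _ _ (fun _ _ _ => rfl) i1 i2

lemma pair2 (grid : List (List Int)) (n : Nat) (i1 i2 : List (List Int)) :
    (List.range' 1 n).foldl
      (fun (s : List (List Int) × List (List Int)) col =>
        (pvSet2 s.1 0 col (pvGet2 s.1 0 (col - 1) + pvGet2 grid 0 col),
         pvSet2 s.2 0 col (pvGet2 s.2 0 (col - 1) + pvGet2 grid 0 col))) (i1, i2)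
    = (sPh2 grid i1 n, sPh2 grid i2 n) :=
  foldl_prod _ _ _ _ (fun _ _ _ => rfl) i1 i2

lemma pair3 (grid : List (List Int)) (nR nC : Nat) (i1 i2 : List (List Int)) :
    (List.range' 1 nR).foldl
      (fun (s : List (List Int) × List (List Int)) row =>
        (List.range' 1 nC).foldl
          (fun (s2 : List (List Int) × List (List Int)) col =>
            (pvSet2 s2.1 row col
               (min (pvGet2 s2.1 (row - 1) col) (pvGet2 s2.1 row (col - 1)) + pvGet2 grid row col),
             pvSet2 s2.2 row col
               (max (pvGet2 s2.2 (row - 1) col) (pvGet2 s2.2 row (col - 1)) + pvGet2 grid row col))) s) (i1, i2)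
    = (sPh3 grid min i1 nR nC, sPh3 grid max i2 nR nC) :=
  foldl_prod _ _ (fun a row => sRow grid min row a nC) (fun b row => sRow grid max row b nC)
    (fun a b row =>
      foldl_prod _ _
        (fun m2 col => pvSet2 m2 row col
          (min (pvGet2 m2 (row - 1) col) (pvGet2 m2 row (col - 1)) + pvGet2 grid row col))
        (fun m2 col => pvSet2 m2 row col
          (max (pvGet2 m2 (row - 1) col) (pvGet2 m2 row (col - 1)) + pvGet2 grid row col))
        (fun _ _ _ => rfl) a b) i1 i2

lemma sPh1_char (grid : List (List Int)) (op : Int → Int → Int) (R C : Nat)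
    (hC : 1 ≤ C) (init : List (List Int)) (hs : Shaped init R C)
    (hget : ∀ r c, r < R → c < C →
      pvGet2 init r c = if r = 0 ∧ c = 0 then pvGet2 grid 0 0 else 0) :
    ∀ n, n ≤ R - 1 → Shaped (sPh1 grid init n) R C ∧
      ∀ r c, r < R → c < C → pvGet2 (sPh1 grid init n) r c =
        if c = 0 ∧ r ≤ n then solveG (pvGet2 grid) op r 0 else pvGet2 init r c := by
  intro n
  induction n with
  | zero =>
      intro _
      have h0 : sPh1 grid init 0 = init := rfl
      refine ⟨by rw [h0]; exact hs, ?_⟩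
      intro r c hr hc
      rw [h0]
      by_cases h : c = 0 ∧ r ≤ 0
      · obtain ⟨hc0, hr0⟩ := h
        have hr0' : r = 0 := by omega
        subst hc0; subst hr0'
        rw [if_pos ⟨rfl, le_refl 0⟩, hget 0 0 hr hc, if_pos ⟨rfl, rfl⟩]
        simp [solveG]
      · rw [if_neg h]
  | succ n ih =>
      intro hn
      obtain ⟨ihs, ihget⟩ := ih (by omega)
      have hstep : sPh1 grid init (n + 1) =
          pvSet2 (sPh1 grid init n) (n + 1) 0
            (pvGet2 (sPh1 grid init n) (n + 1 - 1) 0 + pvGet2 grid (n + 1) 0) := by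
        unfold sPh1
        rw [range'_snoc, List.foldl_append]
        rfl
      have hnR : n + 1 < R := by omega
      have hread : pvGet2 (sPh1 grid init n) (n + 1 - 1) 0 = solveG (pvGet2 grid) op n 0 := by
        have : n + 1 - 1 = n := by omega
        rw [this, ihget n 0 (by omega) (by omega), if_pos ⟨rfl, le_refl n⟩]
      refine ⟨by rw [hstep]; exact shaped_set2 ihs _ _ _, ?_⟩
      intro r c hr hc
      rw [hstep, hread]
      by_cases hme : r = n + 1 ∧ c = 0
      · obtain ⟨hr1, hc1⟩ := hme
        subst hr1; subst hc1
        rw [get2_set2_same ihs hnR (by omega), if_pos ⟨rfl, by omega⟩]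
        simp [solveG]
      · have hne : r ≠ n + 1 ∨ c ≠ 0 := by tauto
        rw [get2_set2_ne hne, ihget r c hr hc]
        by_cases hc0 : c = 0
        · subst hc0
          have hrne : r ≠ n + 1 := by tauto
          by_cases hrn : r ≤ n
          · rw [if_pos ⟨rfl, hrn⟩, if_pos ⟨rfl, by omega⟩]
          · rw [if_neg (by omega), if_neg (by omega)]
        · rw [if_neg (by tauto), if_neg (by tauto)]

lemma sPh2_char (grid : List (List Int)) (op : Int → Int → Int) (R C : Nat)
    (hR : 1 ≤ R) (hC : 1 ≤ C) (init : List (List Int)) (hs : Shaped init R C)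
    (hget : ∀ r c, r < R → c < C →
      pvGet2 init r c = if c = 0 then solveG (pvGet2 grid) op r 0 else 0) :
    ∀ n, n ≤ C - 1 → Shaped (sPh2 grid init n) R C ∧
      ∀ r c, r < R → c < C → pvGet2 (sPh2 grid init n) r c =
        if r = 0 ∧ 1 ≤ c ∧ c ≤ n then solveG (pvGet2 grid) op 0 c else pvGet2 init r c := by
  intro n
  induction n with
  | zero =>
      intro _
      have h0 : sPh2 grid init 0 = init := rfl
      refine ⟨by rw [h0]; exact hs, ?_⟩
      intro r c hr hc
      rw [h0, if_neg (by omega)]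
  | succ n ih =>
      intro hn
      obtain ⟨ihs, ihget⟩ := ih (by omega)
      have hstep : sPh2 grid init (n + 1) =
          pvSet2 (sPh2 grid init n) 0 (n + 1)
            (pvGet2 (sPh2 grid init n) 0 (n + 1 - 1) + pvGet2 grid 0 (n + 1)) := by
        unfold sPh2
        rw [range'_snoc, List.foldl_append]
        rfl
      have hnC : n + 1 < C := by omega
      have hread : pvGet2 (sPh2 grid init n) 0 (n + 1 - 1) = solveG (pvGet2 grid) op 0 n := by
        have h11 : n + 1 - 1 = n := by omega
        rw [h11, ihget 0 n (by omega) (by omega)]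
        by_cases hn0 : n = 0
        · subst hn0
          rw [if_neg (by omega), hget 0 0 (by omega) (by omega), if_pos rfl]
        · rw [if_pos ⟨rfl, by omega, le_refl n⟩]
      refine ⟨by rw [hstep]; exact shaped_set2 ihs _ _ _, ?_⟩
      intro r c hr hc
      rw [hstep, hread]
      by_cases hme : r = 0 ∧ c = n + 1
      · obtain ⟨hr1, hc1⟩ := hme
        subst hr1; subst hc1
        rw [get2_set2_same ihs (by omega) hnC, if_pos ⟨rfl, by omega, le_refl _⟩]
        simp [solveG]
      · have hne : r ≠ 0 ∨ c ≠ n + 1 := by tauto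
        rw [get2_set2_ne hne, ihget r c hr hc]
        by_cases hin : r = 0 ∧ 1 ≤ c ∧ c ≤ n
        · rw [if_pos hin, if_pos ⟨hin.1, hin.2.1, by omega⟩]
        · rw [if_neg hin, if_neg (by
            rintro ⟨h0, h1c, hcn⟩
            exact hin ⟨h0, h1c, by omega⟩)]

lemma sRow_char (grid : List (List Int)) (op : Int → Int → Int) (R C : Nat)
    (ρ : Nat) (hρ1 : 1 ≤ ρ) (hρR : ρ < R)
    (m : List (List Int)) (hs : Shaped m R C)
    (hget : ∀ r c, r < R → c < C →
      pvGet2 m r c = if r ≤ ρ - 1 ∨ c = 0 then solveG (pvGet2 grid) op r c else 0) :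
    ∀ n, n ≤ C - 1 → Shaped (sRow grid op ρ m n) R C ∧
      ∀ r c, r < R → c < C → pvGet2 (sRow grid op ρ m n) r c =
        if r = ρ ∧ 1 ≤ c ∧ c ≤ n then solveG (pvGet2 grid) op ρ c else pvGet2 m r c := by
  intro n
  induction n with
  | zero =>
      intro _
      have h0 : sRow grid op ρ m 0 = m := rfl
      refine ⟨by rw [h0]; exact hs, ?_⟩
      intro r c hr hc
      rw [h0, if_neg (by omega)]
  | succ n ih =>
      intro hn
      obtain ⟨ihs, ihget⟩ := ih (by omega)
      have hstep : sRow grid op ρ m (n + 1) =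
          pvSet2 (sRow grid op ρ m n) ρ (n + 1)
            (op (pvGet2 (sRow grid op ρ m n) (ρ - 1) (n + 1))
                (pvGet2 (sRow grid op ρ m n) ρ (n + 1 - 1)) + pvGet2 grid ρ (n + 1)) := by
        unfold sRow
        rw [range'_snoc, List.foldl_append]
        rfl
      have hnC : n + 1 < C := by omega
      have hup : pvGet2 (sRow grid op ρ m n) (ρ - 1) (n + 1) =
          solveG (pvGet2 grid) op (ρ - 1) (n + 1) := by
        rw [ihget (ρ - 1) (n + 1) (by omega) hnC, if_neg (by omega),
          hget (ρ - 1) (n + 1) (by omega) hnC, if_pos (Or.inl (le_refl _))]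
      have hlf : pvGet2 (sRow grid op ρ m n) ρ (n + 1 - 1) = solveG (pvGet2 grid) op ρ n := by
        have h11 : n + 1 - 1 = n := by omega
        rw [h11, ihget ρ n (by omega) (by omega)]
        by_cases hn0 : n = 0
        · subst hn0
          rw [if_neg (by omega), hget ρ 0 (by omega) (by omega), if_pos (Or.inr rfl)]
        · rw [if_pos ⟨rfl, by omega, le_refl n⟩]
      have hval : op (solveG (pvGet2 grid) op (ρ - 1) (n + 1)) (solveG (pvGet2 grid) op ρ n) +
          pvGet2 grid ρ (n + 1) = solveG (pvGet2 grid) op ρ (n + 1) := by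
        obtain ⟨ρ', rfl⟩ : ∃ p, ρ = p + 1 := ⟨ρ - 1, by omega⟩
        simp [solveG]
      refine ⟨by rw [hstep]; exact shaped_set2 ihs _ _ _, ?_⟩
      intro r c hr hc
      rw [hstep, hup, hlf]
      by_cases hme : r = ρ ∧ c = n + 1
      · obtain ⟨hr1, hc1⟩ := hme
        subst hr1; subst hc1
        rw [get2_set2_same ihs hρR hnC, hval, if_pos ⟨rfl, by omega, le_refl _⟩]
      · have hne : r ≠ ρ ∨ c ≠ n + 1 := by tauto
        rw [get2_set2_ne hne, ihget r c hr hc]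
        by_cases hin : r = ρ ∧ 1 ≤ c ∧ c ≤ n
        · rw [if_pos hin, if_pos ⟨hin.1, hin.2.1, by omega⟩]
        · rw [if_neg hin, if_neg (by
            rintro ⟨h0, h1c, hcn⟩
            exact hin ⟨h0, h1c, by omega⟩)]

lemma sPh3_char (grid : List (List Int)) (op : Int → Int → Int) (R C : Nat)
    (hR : 1 ≤ R) (hC : 1 ≤ C) (init : List (List Int)) (hs : Shaped init R C)
    (hget : ∀ r c, r < R → c < C →
      pvGet2 init r c = if r ≤ 0 ∨ c = 0 then solveG (pvGet2 grid) op r c else 0) :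
    ∀ n, n ≤ R - 1 → Shaped (sPh3 grid op init n (C - 1)) R C ∧
      ∀ r c, r < R → c < C → pvGet2 (sPh3 grid op init n (C - 1)) r c =
        if r ≤ n ∨ c = 0 then solveG (pvGet2 grid) op r c else 0 := by
  intro n
  induction n with
  | zero => intro _; exact ⟨hs, hget⟩
  | succ n ih =>
      intro hn
      obtain ⟨ihs, ihget⟩ := ih (by omega)
      have hstep : sPh3 grid op init (n + 1) (C - 1) =
          sRow grid op (n + 1) (sPh3 grid op init n (C - 1)) (C - 1) := by
        unfold sPh3
        rw [range'_snoc, List.foldl_append]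
        rfl
      have hprev : ∀ r c, r < R → c < C →
          pvGet2 (sPh3 grid op init n (C - 1)) r c =
            if r ≤ (n + 1) - 1 ∨ c = 0 then solveG (pvGet2 grid) op r c else 0 := by
        intro r c hr hc
        have h11 : (n + 1) - 1 = n := by omega
        rw [h11]; exact ihget r c hr hc
      obtain ⟨rs, rget⟩ := sRow_char grid op R C (n + 1) (by omega) (by omega)
        (sPh3 grid op init n (C - 1)) ihs hprev (C - 1) (le_refl _)
      refine ⟨by rw [hstep]; exact rs, ?_⟩
      intro r c hr hc
      rw [hstep, rget r c hr hc, ihget r c hr hc]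
      by_cases hme : r = n + 1 ∧ 1 ≤ c
      · obtain ⟨h1, h2⟩ := hme
        subst h1
        rw [if_pos ⟨rfl, h2, by omega⟩, if_pos (Or.inl (le_refl _))]
      · rw [if_neg (by tauto)]
        by_cases hin : r ≤ n ∨ c = 0
        · rw [if_pos hin, if_pos (by omega)]
        · rw [if_neg hin, if_neg (by omega)]

lemma tbl_get (grid : List (List Int)) (op : Int → Int → Int) (R C : Nat)
    (hR : 1 ≤ R) (hC : 1 ≤ C) (r c : Nat) (hr : r < R) (hc : c < C) :
    pvGet2 (sPh3 grid op
      (sPh2 grid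
        (sPh1 grid (pvSet2 (List.replicate R (List.replicate C 0)) 0 0 (pvGet2 grid 0 0)) (R - 1))
        (C - 1)) (R - 1) (C - 1)) r c = solveG (pvGet2 grid) op r c := by
  have hs0 : Shaped (pvSet2 (List.replicate R (List.replicate C 0)) 0 0 (pvGet2 grid 0 0)) R C :=
    shaped_set2 (shaped_replicate R C) _ _ _
  have hg0 : ∀ r c, r < R → c < C →
      pvGet2 (pvSet2 (List.replicate R (List.replicate C 0)) 0 0 (pvGet2 grid 0 0)) r c =
        if r = 0 ∧ c = 0 then pvGet2 grid 0 0 else 0 := by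
    intro r c hr hc
    by_cases h : r = 0 ∧ c = 0
    · obtain ⟨h1, h2⟩ := h; subst h1; subst h2
      rw [get2_set2_same (shaped_replicate R C) (by omega) (by omega), if_pos ⟨rfl, rfl⟩]
    · rw [if_neg h, get2_set2_ne (by tauto), get2_replicate]
  obtain ⟨hs1, hg1⟩ := sPh1_char grid op R C hC _ hs0 hg0 (R - 1) (le_refl _)
  have hg1' : ∀ r c, r < R → c < C →
      pvGet2 (sPh1 grid (pvSet2 (List.replicate R (List.replicate C 0)) 0 0 (pvGet2 grid 0 0)) (R - 1)) r c =
        if c = 0 then solveG (pvGet2 grid) op r 0 else 0 := by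
    intro r c hr hc
    rw [hg1 r c hr hc]
    by_cases hc0 : c = 0
    · rw [if_pos ⟨hc0, by omega⟩, if_pos hc0]
    · rw [if_neg (by tauto), if_neg hc0, hg0 r c hr hc, if_neg (by tauto)]
  obtain ⟨hs2, hg2⟩ := sPh2_char grid op R C hR hC _ hs1 hg1' (C - 1) (le_refl _)
  have hg2' : ∀ r c, r < R → c < C →
      pvGet2 (sPh2 grid
        (sPh1 grid (pvSet2 (List.replicate R (List.replicate C 0)) 0 0 (pvGet2 grid 0 0)) (R - 1))
        (C - 1)) r c =
        if r ≤ 0 ∨ c = 0 then solveG (pvGet2 grid) op r c else 0 := by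
    intro r c hr hc
    rw [hg2 r c hr hc]
    by_cases hc0 : c = 0
    · rw [if_neg (by omega), hg1' r c hr hc, if_pos hc0, if_pos (Or.inr hc0)]
      subst hc0; rfl
    · by_cases hr0 : r = 0
      · subst hr0
        rw [if_pos ⟨rfl, by omega, by omega⟩, if_pos (Or.inl (le_refl 0))]
      · rw [if_neg (by tauto), hg1' r c hr hc, if_neg hc0, if_neg (by omega)]
  obtain ⟨hs3, hg3⟩ := sPh3_char grid op R C hR hC _ hs2 hg2' (R - 1) (le_refl _)
  rw [hg3 r c hr hc, if_pos (Or.inl (by omega))]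

-- ===== VERDICT (by name: the statement is the Claim_ definition above) =====
theorem isThereAPath_spec : Claim_equal_isThereAPath := by
  intro grid _ hpre
  obtain ⟨hne, hcase⟩ := hpre
  unfold Spec_isThereAPath
  obtain ⟨row0, rest, rfl⟩ : ∃ r t, grid = r :: t := by
    cases grid with
    | nil => exact absurd rfl hne
    | cons a l => exact ⟨a, l, rfl⟩
  by_cases hp : ((row0 :: rest).length + row0.length) % 2 = 0
  · have hp' : (rest.length + 1 + row0.length) % 2 = 0 := by simpa using hp
    simp [isThereAPath, isThereAPath_alt, hp']
  · have hC : 1 ≤ row0.length := by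
      rcases hcase with h | h
      · exact absurd (by simpa using h) hp
      · simpa using h.1
    have hR : 1 ≤ (row0 :: rest).length := by simp
    simp only [isThereAPath, isThereAPath_alt]
    rw [if_neg (by simpa using hp), if_neg (by simpa using hp)]
    rw [pair1, pair2, pair3]
    rw [pvSolve_eq, pvCell_eq]
    rw [tbl_get (row0 :: rest) min ((row0 :: rest).length) (row0.length) hR hC _ _ (by omega) (by omega)]
    rw [tbl_get (row0 :: rest) max ((row0 :: rest).length) (row0.length) hR hC _ _ (by omega) (by omega)]
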